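-- pv_equiv track=rewrite | github.com/Yashwant-Tailor/LeetCodeSolution | python_solutions/1703.py | get_left_moves
-- ===== SOURCE A (Python) =====
-- def get_left_moves(nums,left_idx,right_idx):
--     moves = 0
--     curr_one = 0
--     zero_cnt = 0
--     for idx in range(left_idx , right_idx):
--         if nums[idx] == 1:
--             curr_one += 1
--         else:
--             moves += curr_one
--             zero_cnt += 1
--     return zero_cnt,moves
-- ===== SOURCE B (Python) =====
-- def get_left_moves(nums, left_idx, right_idx):
--     vals = [nums[i] for i in range(left_idx, right_idx)]
--     prefix = [0]
--     for v in vals: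
--         prefix.append(prefix[-1] + (1 if v == 1 else 0))
--     zero_prefixes = [p for p, v in zip(prefix, vals) if v != 1]
--     return len(zero_prefixes), sum(zero_prefixes)
-- ===== Notes on version B (the rewrite author's own statement) =====
-- stated objective: alternative
-- what changed: B replaces A's single accumulating scan by staged passes: extract the window, build a prefix-ones table, then select the prefix value at every non-one via zip+filter and return the count and sum of those selected values.
import Mathlib
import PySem

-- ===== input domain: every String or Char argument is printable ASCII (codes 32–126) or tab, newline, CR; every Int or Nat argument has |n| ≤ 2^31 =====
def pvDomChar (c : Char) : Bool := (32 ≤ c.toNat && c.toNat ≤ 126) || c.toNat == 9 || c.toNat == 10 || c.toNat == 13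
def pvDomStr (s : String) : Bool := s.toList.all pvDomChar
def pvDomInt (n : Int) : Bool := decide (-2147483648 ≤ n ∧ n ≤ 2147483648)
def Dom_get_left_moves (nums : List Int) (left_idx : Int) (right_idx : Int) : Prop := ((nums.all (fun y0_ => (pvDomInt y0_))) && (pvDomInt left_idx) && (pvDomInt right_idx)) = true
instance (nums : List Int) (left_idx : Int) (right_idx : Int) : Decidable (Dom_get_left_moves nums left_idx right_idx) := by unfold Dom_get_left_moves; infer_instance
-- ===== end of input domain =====

-- B replaces A's single accumulating scan by staged passes: extract the window,
-- build a prefix-ones table, then count and sum the prefix values at the non-one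
-- positions (zip + filter). Same work, a different decomposition.

-- ===== PORT A =====
-- loop body of A over the index range; nums[idx] is pyGet?, defaulted (Pre_ guarantees some)
def glmABody (nums : List Int) (st : Int × Int × Int) (idx : Int) : Int × Int × Int :=
  if (PySem.List.pyGet? nums idx).getD 0 = 1 then (st.1, st.2.1 + 1, st.2.2)
  else (st.1 + st.2.1, st.2.1, st.2.2 + 1)

def get_left_moves (nums : List Int) (left_idx : Int) (right_idx : Int) : Int × Int :=
  let res := (PySem.List.pyRange left_idx right_idx 1).foldl (glmABody nums) (0, 0, 0)
  (res.2.2, res.1)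

-- ===== PORT B =====
-- prefix.append(prefix[-1] + (1 if v == 1 else 0)); prefix[-1] is pyGet? at -1, defaulted
def glmPrefStep (p : List Int) (v : Int) : List Int :=
  p ++ [(PySem.List.pyGet? p (-1)).getD 0 + (if v = 1 then 1 else 0)]

def get_left_moves_alt (nums : List Int) (left_idx : Int) (right_idx : Int) : Int × Int :=
  let vals := (PySem.List.pyRange left_idx right_idx 1).map
    (fun i => (PySem.List.pyGet? nums i).getD 0)
  let pre := vals.foldl glmPrefStep [0]
  let zero_prefixes := ((pre.zip vals).filter (fun x => x.2 ≠ 1)).map (fun x => x.1)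
  ((zero_prefixes.length : Int), zero_prefixes.sum)

-- ===== PRECONDITION & SPEC =====
-- excludes exactly the inputs where Python's nums[idx] raises IndexError (both A and B raise there)
def Pre_get_left_moves (nums : List Int) (left_idx : Int) (right_idx : Int) : Prop :=
  right_idx ≤ left_idx ∨
    (-(nums.length : Int) ≤ left_idx ∧ right_idx ≤ (nums.length : Int))
instance (nums : List Int) (left_idx : Int) (right_idx : Int) : Decidable (Pre_get_left_moves nums left_idx right_idx) := by unfold Pre_get_left_moves; infer_instance
def pvWitness_get_left_moves : List Int × Int × Int := ([1, 0, 1, 0, 2], 0, 5)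

def Spec_get_left_moves (nums : List Int) (left_idx : Int) (right_idx : Int) (out : Int × Int) : Prop := out = get_left_moves_alt nums left_idx right_idx
instance (nums : List Int) (left_idx : Int) (right_idx : Int) (out : Int × Int) : Decidable (Spec_get_left_moves nums left_idx right_idx out) := by unfold Spec_get_left_moves; infer_instance

-- ===== CLAIM (what is proved, stated in full; the proofs are below) =====
def Claim_equal_get_left_moves : Prop := ∀ (nums : List Int) (left_idx : Int) (right_idx : Int), Dom_get_left_moves nums left_idx right_idx → Pre_get_left_moves nums left_idx right_idx → Spec_get_left_moves nums left_idx right_idx (get_left_moves nums left_idx right_idx)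

-- ===== LEMMAS AND PROOFS =====

-- counting helpers over a window list
def glmZ : List Int → Int
  | [] => 0
  | v :: t => (if v = 1 then 0 else 1) + glmZ t

def glmO : List Int → Int
  | [] => 0
  | v :: t => (if v = 1 then 1 else 0) + glmO t

-- pairs "a one strictly left of a zero"
def glmP : List Int → Int
  | [] => 0
  | v :: t => glmP t + (if v = 1 then glmZ t else 0)

-- A's pure body on a window value
def glmAPure (st : Int × Int × Int) (v : Int) : Int × Int × Int :=
  if v = 1 then (st.1, st.2.1 + 1, st.2.2) else (st.1 + st.2.1, st.2.1, st.2.2 + 1)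

theorem glmA_fold (w : List Int) (m c z : Int) :
    w.foldl glmAPure (m, c, z) = (m + c * glmZ w + glmP w, c + glmO w, z + glmZ w) := by
  induction w generalizing m c z with
  | nil => simp [glmZ, glmP, glmO]
  | cons v t ih =>
    simp only [List.foldl_cons, glmAPure, glmZ, glmP, glmO]
    split <;> (rw [ih]; simp only [Prod.mk.injEq]; refine ⟨by ring, by ring, by ring⟩)

-- the prefix values that get zipped with the window: running ones-count starting at c
def glmPA (c : Int) : List Int → List Int
  | [] => []
  | v :: t => c :: glmPA (c + (if v = 1 then 1 else 0)) t

-- the fold building B's prefix table, characterised from any nonempty table ending in c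
theorem glmPref_fold' (w : List Int) (q : List Int) (c : Int) :
    w.foldl glmPrefStep (q ++ [c]) = (q ++ glmPA c w) ++ [c + glmO w] := by
  induction w generalizing q c with
  | nil => simp [glmPA, glmO]
  | cons v t ih =>
    simp only [List.foldl_cons, glmPrefStep, PySem.List.pyGet?_neg_one_append_singleton,
      Option.getD_some]
    rw [ih (q ++ [c]) (c + (if v = 1 then 1 else 0))]
    simp [glmPA, glmO, List.append_assoc, add_assoc]

-- zip truncates: zipping (as ++ bs) with w, where as has w's length, ignores bs
theorem glmZip_trunc (as bs w : List Int) (h : as.length = w.length) :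
    (as ++ bs).zip w = as.zip w := by
  induction as generalizing w with
  | nil => cases w <;> simp_all
  | cons a t ih =>
    cases w with
    | nil => simp_all
    | cons x xs => simp_all [List.zip_cons_cons]

theorem glmPA_length (c : Int) (w : List Int) : (glmPA c w).length = w.length := by
  induction w generalizing c with
  | nil => rfl
  | cons v t ih => simp [glmPA, ih]

-- B's selected list: its length is the zero count, its sum is c·zeros + pairs
theorem glmB_sel (w : List Int) (c : Int) :
    ((((glmPA c w).zip w).filter (fun x => x.2 ≠ 1)).map (fun x => x.1)).length
      = glmZ w ∧
    ((((glmPA c w).zip w).filter (fun x => x.2 ≠ 1)).map (fun x => x.1)).sum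
      = c * glmZ w + glmP w := by
  induction w generalizing c with
  | nil => simp [glmPA, glmZ, glmP]
  | cons v t ih =>
    simp only [glmPA, List.zip_cons_cons, glmZ, glmP]
    by_cases hv : v = 1
    · simp only [if_pos hv]
      rw [List.filter_cons_of_neg (by simp [hv])]
      exact ⟨by rw [(ih (c + 1)).1]; ring, by rw [(ih (c + 1)).2]; ring⟩
    · simp only [if_neg hv]
      rw [List.filter_cons_of_pos (by simp [hv])]
      simp only [List.map_cons, List.length_cons, List.sum_cons]
      refine ⟨?_, ?_⟩
      · push_cast; rw [(ih (c + 0)).1]; ring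
      · rw [(ih (c + 0)).2]; ring

-- ===== VERDICT (by name: the statement is the Claim_ definition above) =====
theorem get_left_moves_spec : Claim_equal_get_left_moves := by
  intro nums l r _ _
  unfold Spec_get_left_moves get_left_moves get_left_moves_alt
  have hA : (PySem.List.pyRange l r 1).foldl (glmABody nums) (0, 0, 0)
      = ((PySem.List.pyRange l r 1).map (fun i => (PySem.List.pyGet? nums i).getD 0)).foldl
          glmAPure (0, 0, 0) := by
    rw [List.foldl_map]; rfl
  set w := (PySem.List.pyRange l r 1).map (fun i => (PySem.List.pyGet? nums i).getD 0) with hw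
  have hpre : w.foldl glmPrefStep [0] = glmPA 0 w ++ [0 + glmO w] := by
    simpa using glmPref_fold' w [] 0
  have hzip : (w.foldl glmPrefStep [0]).zip w = (glmPA 0 w).zip w := by
    rw [hpre]; exact glmZip_trunc _ _ _ (glmPA_length 0 w)
  simp only [hA, glmA_fold, hzip]
  have := glmB_sel w 0
  simp only [Prod.mk.injEq]
  constructor
  · rw [this.1]; ring
  · rw [this.2]; ring
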